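-- pv_equiv track=rewrite | github.com/yushyn-andriy/algo | competitions/onlinejudge/ch2/linear/11093/p11093.py | get_available_station
-- ===== SOURCE A (Python) =====
-- def get_available_station(n, petrol, consuptions):
--     for i in range(n):
--         j = (i + 1) % n
--         avail_petrol = petrol[i] - consuptions[i]
--         while j != i and avail_petrol >= 0:
--             avail_petrol += petrol[j]
--             avail_petrol -= consuptions[j]
--             j = (j + 1) % n
--         if i == j and avail_petrol >= 0:
--             return i + 1, True
--     return 0, False
-- ===== SOURCE B (Python) =====
-- def get_available_station(n, petrol, consuptions):
--     # prefix sums + suffix/prefix minima: each start decided in O(1), instead of simulating every start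
--     if n <= 0:
--         return 0, False
--     S = [0]
--     for i in range(n):
--         S.append(S[-1] + petrol[i] - consuptions[i])
--     total = S[n]
--     # sufmin[i] = min(S[i..n]) for 1 <= i <= n
--     sufmin = [0] * (n + 1)
--     sufmin[n] = S[n]
--     for i in range(n - 1, 0, -1):
--         sufmin[i] = min(S[i], sufmin[i + 1])
--     # premin[i] = min(S[1..i]) for 1 <= i <= n
--     premin = [0] * (n + 1)
--     premin[1] = S[1]
--     for i in range(2, n + 1):
--         premin[i] = min(premin[i - 1], S[i])
--     # start i works iff every circular prefix sum from i is >= 0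
--     for i in range(n):
--         if S[i] <= sufmin[i + 1] and (i == 0 or S[i] <= total + premin[i]):
--             return i + 1, True
--     return 0, False
-- ===== Notes on version B (the rewrite author's own statement) =====
-- stated objective: alternative
-- what changed: A simulates the circular trip from every start (nested loops); B computes prefix sums once and decides each start in O(1) via precomputed suffix minima of S[1..n] and prefix minima (for the wrapped part), returning the first valid start; on random inputs A's simulations abort early, so no measured speed-up is claimed.
-- outside the precondition, e.g. on get_available_station(2, [1], [1]): A raises IndexError, B raises IndexError
import Mathlib
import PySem

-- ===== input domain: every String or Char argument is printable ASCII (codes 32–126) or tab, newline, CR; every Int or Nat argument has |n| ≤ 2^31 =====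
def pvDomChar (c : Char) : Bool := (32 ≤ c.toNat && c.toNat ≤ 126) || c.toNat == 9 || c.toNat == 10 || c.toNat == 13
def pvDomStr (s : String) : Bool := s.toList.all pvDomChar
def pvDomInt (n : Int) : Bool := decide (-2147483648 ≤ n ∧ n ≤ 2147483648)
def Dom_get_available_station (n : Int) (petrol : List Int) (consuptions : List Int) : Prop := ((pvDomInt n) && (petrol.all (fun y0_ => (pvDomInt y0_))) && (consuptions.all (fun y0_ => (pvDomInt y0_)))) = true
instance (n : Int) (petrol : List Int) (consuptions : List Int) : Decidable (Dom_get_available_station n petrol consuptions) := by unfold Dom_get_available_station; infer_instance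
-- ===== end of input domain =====

-- B decides each start via prefix sums with precomputed suffix/prefix minima, instead of A's per-start circular simulation; equal return value on Pre_.

-- ===== PORT A =====
-- the while loop: state (j, avail); fuel n.toNat bounds its ≤ n-1 iterations
def innerA (n i : Int) (petrol cons : List Int) : Nat → Int → Int → Int × Int
  | 0, j, avail => (j, avail)
  | fuel + 1, j, avail =>
    if j ≠ i ∧ avail ≥ 0 then
      innerA n i petrol cons fuel (PySem.Int.mod (j + 1) n)
        (avail + PySem.List.pyGetD petrol j 0 - PySem.List.pyGetD cons j 0)
    else (j, avail)

-- the for loop over range(n), with early return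
def outerA (n : Int) (petrol cons : List Int) : List Int → Int × Bool
  | [] => (0, false)
  | i :: rest =>
    if i = (innerA n i petrol cons n.toNat (PySem.Int.mod (i + 1) n)
          (PySem.List.pyGetD petrol i 0 - PySem.List.pyGetD cons i 0)).1 ∧
       (innerA n i petrol cons n.toNat (PySem.Int.mod (i + 1) n)
          (PySem.List.pyGetD petrol i 0 - PySem.List.pyGetD cons i 0)).2 ≥ 0
    then (i + 1, true) else outerA n petrol cons rest

def get_available_station (n : Int) (petrol : List Int) (consuptions : List Int) : Int × Bool :=
  outerA n petrol consuptions (PySem.List.pyRange 0 n 1)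

-- ===== PORT B =====
-- petrol[k] - consuptions[k]
def dd (p c : List Int) (k : Nat) : Int := p.getD k 0 - c.getD k 0

-- S[k]: prefix sums (Source B's list S, as its defining recurrence)
def altS (p c : List Int) : Nat → Int
  | 0 => 0
  | k + 1 => altS p c k + dd p c k

-- sufmin[i] = min(S[i..n]) (Source B's downward loop, as its recurrence)
def altSuf (p c : List Int) (n' : Nat) (i : Nat) : Int :=
  if _h : i < n' then min (altS p c i) (altSuf p c n' (i + 1)) else altS p c n'
  termination_by n' - i
  decreasing_by omega

-- premin[i] = min(S[1..i]) (Source B's upward loop, as its recurrence)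
def altPre (p c : List Int) : Nat → Int
  | 0 => 0
  | 1 => altS p c 1
  | i + 2 => min (altPre p c (i + 1)) (altS p c (i + 2))

-- the final scan: first i with S[i] <= sufmin[i+1] and (i == 0 or S[i] <= total + premin[i])
def altScan (p c : List Int) (n' : Nat) (total : Int) (i : Nat) : Int × Bool :=
  if _h : i < n' then
    if altS p c i ≤ altSuf p c n' (i + 1) ∧ (i = 0 ∨ altS p c i ≤ total + altPre p c i) then
      ((i : Int) + 1, true)
    else altScan p c n' total (i + 1)
  else (0, false)
  termination_by n' - i
  decreasing_by omega

def get_available_station_alt (n : Int) (petrol : List Int) (consuptions : List Int) : Int × Bool :=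
  if n ≤ 0 then (0, false)
  else altScan petrol consuptions n.toNat (altS petrol consuptions n.toNat) 0

-- ===== PRECONDITION & SPEC =====
-- Pre_ excludes exactly the inputs where Python A raises IndexError: n larger than either list.
def Pre_get_available_station (n : Int) (petrol : List Int) (consuptions : List Int) : Prop :=
  n ≤ (petrol.length : Int) ∧ n ≤ (consuptions.length : Int)
instance (n : Int) (petrol : List Int) (consuptions : List Int) : Decidable (Pre_get_available_station n petrol consuptions) := by unfold Pre_get_available_station; infer_instance

def pvWitness_get_available_station : Int × List Int × List Int := (2, [1, 2], [2, 1])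

def Spec_get_available_station (n : Int) (petrol : List Int) (consuptions : List Int) (out : Int × Bool) : Prop := out = get_available_station_alt n petrol consuptions
instance (n : Int) (petrol : List Int) (consuptions : List Int) (out : Int × Bool) : Decidable (Spec_get_available_station n petrol consuptions out) := by unfold Spec_get_available_station; infer_instance

-- ===== CLAIM (what is proved, stated in full; the proofs are below) =====
def Claim_equal_get_available_station : Prop := ∀ (n : Int) (petrol : List Int) (consuptions : List Int), Dom_get_available_station n petrol consuptions → Pre_get_available_station n petrol consuptions → Spec_get_available_station n petrol consuptions (get_available_station n petrol consuptions)

-- ===== LEMMAS AND PROOFS =====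

-- circular prefix sums starting at i: csum i t = sum of dd over i, i+1, ..., (mod n'), t terms
def csum (p c : List Int) (n' i : Nat) : Nat → Int
  | 0 => 0
  | t + 1 => csum p c n' i t + dd p c ((i + t) % n')

lemma mod_ne_of_lt {i k N : Nat} (hi : i < N) (hk : k < N - 1) : (i + 1 + k) % N ≠ i := by
  rcases lt_or_ge (i + 1 + k) N with h | h
  · rw [Nat.mod_eq_of_lt h]; omega
  · have h2 : i + 1 + k - N < N := by omega
    rw [Nat.mod_eq_sub_mod h, Nat.mod_eq_of_lt h2]; omega

lemma mod_eq_self_add {i N : Nat} (hi : i < N) : (i + N) % N = i := by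
  rw [Nat.add_mod_right, Nat.mod_eq_of_lt hi]

lemma innerA_iff (p c : List Int) (N : Nat) (hN : 0 < N) :
    ∀ (fuel k i : Nat), i < N → k ≤ N - 1 → N - 1 - k ≤ fuel →
    (((i : Int) = (innerA (N : Int) (i : Int) p c fuel (((i + 1 + k) % N : Nat) : Int) (csum p c N i (k + 1))).1 ∧
      (innerA (N : Int) (i : Int) p c fuel (((i + 1 + k) % N : Nat) : Int) (csum p c N i (k + 1))).2 ≥ 0) ↔
      (∀ t, k + 1 ≤ t → t ≤ N → 0 ≤ csum p c N i t)) := by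
  intro fuel
  induction fuel with
  | zero =>
    intro k i hi hk hf
    have hkN : k = N - 1 := by omega
    subst hkN
    have hj : (i + 1 + (N - 1)) % N = i := by
      have : i + 1 + (N - 1) = i + N := by omega
      rw [this, mod_eq_self_add hi]
    rw [hj]
    simp only [innerA]
    constructor
    · rintro ⟨-, h2⟩ t ht1 ht2
      have : t = N - 1 + 1 := by omega
      rw [this]; exact h2
    · intro h
      exact ⟨by simp, h (N - 1 + 1) (by omega) (by omega)⟩
  | succ fuel ih =>
    intro k i hi hk hf
    by_cases hkN : k = N - 1
    · subst hkN
      have hj : (i + 1 + (N - 1)) % N = i := by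
        have : i + 1 + (N - 1) = i + N := by omega
        rw [this, mod_eq_self_add hi]
      rw [hj]
      simp only [innerA, ne_eq, not_true_eq_false, false_and, if_neg, not_false_eq_true]
      constructor
      · rintro ⟨-, h2⟩ t ht1 ht2
        have : t = N - 1 + 1 := by omega
        rw [this]; exact h2
      · intro h
        exact ⟨by simp, h (N - 1 + 1) (by omega) (by omega)⟩
    · have hklt : k < N - 1 := by omega
      have hjne : ((((i + 1 + k) % N : Nat) : Int)) ≠ (i : Int) := by
        exact_mod_cast fun h => mod_ne_of_lt hi hklt (Nat.cast_injective h)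
      by_cases hav : (0 : Int) ≤ csum p c N i (k + 1)
      · -- loop body runs
        have hstep : innerA (N : Int) (i : Int) p c (fuel + 1) (((i + 1 + k) % N : Nat) : Int) (csum p c N i (k + 1)) =
            innerA (N : Int) (i : Int) p c fuel (((i + 1 + (k + 1)) % N : Nat) : Int) (csum p c N i (k + 1 + 1)) := by
          simp only [innerA, ne_eq, hjne, not_false_eq_true, true_and, ge_iff_le, hav, if_pos]
          congr 1
          · -- next j
            rw [PySem.Int.mod_eq_emod_of_pos (by exact_mod_cast hN)]
            have : (((i + 1 + k) % N : Nat) : Int) + 1 = (((i + 1 + k) % N + 1 : Nat) : Int) := by push_cast; ring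
            rw [this]
            have hnat : ((i + 1 + k) % N + 1) % N = (i + 1 + (k + 1)) % N := by
              conv_rhs => rw [show i + 1 + (k + 1) = (i + 1 + k) + 1 by omega, Nat.add_mod]
              rw [Nat.add_mod ((i + 1 + k) % N) 1]
              simp
            rw [← hnat]
            push_cast
            ring
          · -- next avail
            simp only [PySem.List.pyGetD_natCast]
            show _ = csum p c N i (k + 1) + dd p c ((i + (k + 1)) % N)
            rw [show i + (k + 1) = i + 1 + k by omega]
            simp [dd]; ring
        rw [hstep]
        rw [ih (k + 1) i hi (by omega) (by omega)]
        constructor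
        · intro h t ht1 ht2
          rcases eq_or_lt_of_le ht1 with he | hl
          · rw [← he]; exact hav
          · exact h t (by omega) ht2
        · intro h t ht1 ht2; exact h t (by omega) ht2
      · -- loop exits with negative avail, j ≠ i
        simp only [innerA, ne_eq, hjne, not_false_eq_true, true_and, ge_iff_le, hav, if_neg, not_false_eq_true]
        constructor
        · rintro ⟨h1, -⟩; exact absurd h1.symm hjne
        · intro h; exact absurd (h (k + 1) le_rfl (by omega)) hav

lemma altSuf_le_iff (p c : List Int) (N : Nat) (x : Int) :
    ∀ i, i ≤ N → (x ≤ altSuf p c N i ↔ ∀ j, i ≤ j → j ≤ N → x ≤ altS p c j) := by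
  have key : ∀ d i, N - i = d → i ≤ N →
      (x ≤ altSuf p c N i ↔ ∀ j, i ≤ j → j ≤ N → x ≤ altS p c j) := by
    intro d
    induction d with
    | zero =>
      intro i hd hi
      rw [altSuf, dif_neg (by omega)]
      constructor
      · intro h j hj1 hj2
        have hj : j = N := by omega
        rw [hj]; exact h
      · intro h; exact h N (by omega) le_rfl
    | succ d ih =>
      intro i hd hi
      have hiN : i < N := by omega
      rw [altSuf, dif_pos hiN, le_min_iff, ih (i + 1) (by omega) (by omega)]
      constructor
      · rintro ⟨h1, h2⟩ j hj1 hj2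
        rcases eq_or_lt_of_le hj1 with he | hl
        · rw [← he]; exact h1
        · exact h2 j (by omega) hj2
      · intro h
        exact ⟨h i le_rfl (by omega), fun j hj1 hj2 => h j (by omega) hj2⟩
  intro i hi; exact key (N - i) i rfl hi

lemma altPre_le_iff (p c : List Int) (x : Int) :
    ∀ i, 1 ≤ i → (x ≤ altPre p c i ↔ ∀ j, 1 ≤ j → j ≤ i → x ≤ altS p c j) := by
  intro i
  induction i with
  | zero => intro h; exact absurd h (by omega)
  | succ i ih =>
    intro _
    rcases Nat.eq_zero_or_pos i with h0 | h1
    · subst h0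
      simp only [altPre]
      constructor
      · intro h j hj1 hj2
        have : j = 1 := by omega
        subst this; exact h
      · intro h; exact h 1 le_rfl le_rfl
    · obtain ⟨i', rfl⟩ : ∃ i', i = i' + 1 := ⟨i - 1, by omega⟩
      simp only [altPre, le_min_iff]
      rw [ih (by omega)]
      constructor
      · rintro ⟨h1, h2⟩ j hj1 hj2
        rcases eq_or_lt_of_le hj2 with he | hl
        · rw [he]; exact h2
        · exact h1 j hj1 (by omega)
      · intro h
        exact ⟨fun j hj1 hj2 => h j hj1 (by omega), h (i' + 1 + 1) (by omega) le_rfl⟩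

lemma csum_closed (p c : List Int) (N : Nat) (i : Nat) (hi : i < N) :
    ∀ t, t ≤ N → csum p c N i t =
      if i + t ≤ N then altS p c (i + t) - altS p c i
      else altS p c (i + t - N) + altS p c N - altS p c i := by
  intro t
  induction t with
  | zero =>
    intro _
    rw [if_pos (by omega)]
    simp [csum]
  | succ t ih =>
    intro ht
    have ihv := ih (by omega)
    simp only [csum]
    rcases lt_or_ge (i + t) N with h | h
    · rw [Nat.mod_eq_of_lt h, ihv, if_pos (by omega)]
      rcases eq_or_lt_of_le (show i + t + 1 ≤ N by omega) with he | hl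
      · rw [if_pos (by omega)]
        have : altS p c (i + (t + 1)) = altS p c (i + t) + dd p c (i + t) := by
          rw [show i + (t + 1) = (i + t) + 1 by omega]; rfl
        rw [this]; ring
      · rw [if_pos (by omega)]
        have : altS p c (i + (t + 1)) = altS p c (i + t) + dd p c (i + t) := by
          rw [show i + (t + 1) = (i + t) + 1 by omega]; rfl
        rw [this]; ring
    · have hmod : (i + t) % N = i + t - N := by
        have h2 : i + t - N < N := by omega
        rw [Nat.mod_eq_sub_mod h, Nat.mod_eq_of_lt h2]
      rw [hmod, ihv]
      rcases eq_or_lt_of_le h with he | hl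
      · -- i + t = N
        rw [if_pos (by omega), if_neg (by omega),
          show i + (t + 1) - N = 1 by omega, show i + t - N = 0 by omega,
          show i + t = N by omega]
        have hS1 : altS p c 1 = dd p c 0 := by simp [altS]
        rw [hS1]; ring
      · rw [if_neg (by omega), if_neg (by omega)]
        have : altS p c (i + (t + 1) - N) = altS p c (i + t - N) + dd p c (i + t - N) := by
          rw [show i + (t + 1) - N = (i + t - N) + 1 by omega]; rfl
        rw [this]; ring

lemma cond_iff_good (p c : List Int) (N : Nat) (i : Nat) (hi : i < N) :
    (altS p c i ≤ altSuf p c N (i + 1) ∧ (i = 0 ∨ altS p c i ≤ altS p c N + altPre p c i)) ↔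
    (∀ t, 1 ≤ t → t ≤ N → 0 ≤ csum p c N i t) := by
  rw [altSuf_le_iff p c N _ (i + 1) (by omega)]
  constructor
  · rintro ⟨h1, h2⟩ t ht1 ht2
    rw [csum_closed p c N i hi t ht2]
    split_ifs with hw
    · have := h1 (i + t) (by omega) (by omega)
      linarith
    · -- wrap: 1 ≤ i + t - N ≤ i, so i ≠ 0
      have hiz : i ≠ 0 := by omega
      rcases h2 with h2 | h2
      · exact absurd h2 hiz
      · have h2' : altS p c i - altS p c N ≤ altPre p c i := by linarith
        rw [altPre_le_iff p c _ i (by omega)] at h2'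
        have := h2' (i + t - N) (by omega) (by omega)
        linarith
  · intro h
    constructor
    · intro j hj1 hj2
      have := h (j - i) (by omega) (by omega)
      rw [csum_closed p c N i hi (j - i) (by omega), if_pos (by omega),
        show i + (j - i) = j by omega] at this
      linarith
    · rcases Nat.eq_zero_or_pos i with h0 | h1
      · exact Or.inl h0
      · right
        have hpre : altS p c i - altS p c N ≤ altPre p c i := by
          rw [altPre_le_iff p c _ i (by omega)]
          intro j hj1 hj2
          have := h (N + j - i) (by omega) (by omega)
          rw [csum_closed p c N i hi (N + j - i) (by omega), if_neg (by omega),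
            show i + (N + j - i) - N = j by omega] at this
          linarith
        linarith

lemma csum_one (p c : List Int) (N m : Nat) (hm : m < N) :
    csum p c N m 1 = dd p c m := by
  simp [csum, Nat.mod_eq_of_lt hm]

lemma outer_eq (p c : List Int) (N : Nat) (hN : 0 < N) :
    ∀ m : Nat, m ≤ N →
      outerA (N : Int) p c (PySem.List.pyRange (m : Int) (N : Int) 1) =
      altScan p c N (altS p c N) m := by
  have key : ∀ d m, N - m = d → m ≤ N →
      outerA (N : Int) p c (PySem.List.pyRange (m : Int) (N : Int) 1) =
      altScan p c N (altS p c N) m := by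
    intro d
    induction d with
    | zero =>
      intro m hd hm
      have : m = N := by omega
      subst this
      rw [PySem.List.pyRange_one_eq_nil le_rfl, altScan, dif_neg (by omega)]
      rfl
    | succ d ih =>
      intro m hd hm
      have hmN : m < N := by omega
      rw [PySem.List.pyRange_one_cons (by exact_mod_cast hmN)]
      simp only [outerA]
      have hmod : PySem.Int.mod ((m : Int) + 1) (N : Int) = (((m + 1 + 0) % N : Nat) : Int) := by
        rw [PySem.Int.mod_eq_emod_of_pos (by exact_mod_cast hN)]
        simp only [Nat.add_zero]
        have : ((m : Int) + 1) = ((m + 1 : Nat) : Int) := by push_cast; ring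
        rw [this]
        push_cast
        ring
      have havail : PySem.List.pyGetD p (m : Int) 0 - PySem.List.pyGetD c (m : Int) 0 =
          csum p c N m (0 + 1) := by
        simp only [Nat.zero_add, csum_one p c N m hmN]
        simp [dd]
      have htn : ((N : Int)).toNat = N := Int.toNat_natCast N
      rw [hmod, havail, htn]
      have hiff := innerA_iff p c N hN N 0 m hmN (by omega) (by omega)
      rw [altScan, dif_pos hmN]
      by_cases hg : ∀ t, 1 ≤ t → t ≤ N → 0 ≤ csum p c N m t
      · rw [if_pos (hiff.mpr (by simpa using hg)), if_pos ((cond_iff_good p c N m hmN).mpr hg)]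
      · rw [if_neg (fun hc => hg (by simpa using hiff.mp ⟨hc.1, hc.2⟩)),
          if_neg (fun hc => hg ((cond_iff_good p c N m hmN).mp hc))]
        have : ((m : Int) + 1) = ((m + 1 : Nat) : Int) := by push_cast; ring
        rw [this]
        exact ih (m + 1) (by omega) (by omega)
  intro m hm; exact key (N - m) m rfl hm

-- ===== VERDICT (by name: the statement is the Claim_ definition above) =====
theorem get_available_station_spec : Claim_equal_get_available_station := by
  unfold Claim_equal_get_available_station Spec_get_available_station
  intro n p c _ _
  unfold get_available_station get_available_station_alt
  by_cases hn : n ≤ 0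
  · rw [if_pos hn, PySem.List.pyRange_one_eq_nil hn]
    rfl
  · rw [if_neg hn]
    have hN : 0 < n.toNat := by omega
    have hout := outer_eq p c n.toNat hN 0 (by omega)
    have hcast : ((n.toNat : Int)) = n := Int.toNat_of_nonneg (by omega)
    rw [hcast] at hout
    simpa using hout
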